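-- pv_equiv track=rewrite | github.com/RyanSeanPhillips/LabIndex | src/labindex_core/services/linker_trainer.py | _has_token_overlap
-- ===== SOURCE A (Python) =====
-- from typing import Dict, List, Optional, Any, Set, Tuple
--
-- def _has_token_overlap(
--
--     src_tokens: Dict[str, List[str]],
--     dst_tokens: Dict[str, List[str]]
-- ) -> bool:
--     """Check if two token sets have any overlap."""
--     for token_type in src_tokens:
--         src_set = set(src_tokens.get(token_type, []))
--         dst_set = set(dst_tokens.get(token_type, []))
--         if src_set & dst_set:
--             return True
--     return False
-- ===== SOURCE B (Python) =====
-- def _has_token_overlap(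
--
--     src_tokens,
--     dst_tokens
-- ) -> bool:
--     """Check if two token sets have any overlap."""
--     index = {(t, tok) for t, toks in src_tokens.items() for tok in toks}
--     return any((t, tok) in index
--                for t, toks in dst_tokens.items()
--                for tok in toks)
-- ===== Notes on version B (the rewrite author's own statement) =====
-- stated objective: alternative
-- what changed: B builds one flattened set of (type, token) pairs from src_tokens and makes a single dst-driven pass checking membership, replacing A's per-type symmetric set construction and intersection.
import Mathlib
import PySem

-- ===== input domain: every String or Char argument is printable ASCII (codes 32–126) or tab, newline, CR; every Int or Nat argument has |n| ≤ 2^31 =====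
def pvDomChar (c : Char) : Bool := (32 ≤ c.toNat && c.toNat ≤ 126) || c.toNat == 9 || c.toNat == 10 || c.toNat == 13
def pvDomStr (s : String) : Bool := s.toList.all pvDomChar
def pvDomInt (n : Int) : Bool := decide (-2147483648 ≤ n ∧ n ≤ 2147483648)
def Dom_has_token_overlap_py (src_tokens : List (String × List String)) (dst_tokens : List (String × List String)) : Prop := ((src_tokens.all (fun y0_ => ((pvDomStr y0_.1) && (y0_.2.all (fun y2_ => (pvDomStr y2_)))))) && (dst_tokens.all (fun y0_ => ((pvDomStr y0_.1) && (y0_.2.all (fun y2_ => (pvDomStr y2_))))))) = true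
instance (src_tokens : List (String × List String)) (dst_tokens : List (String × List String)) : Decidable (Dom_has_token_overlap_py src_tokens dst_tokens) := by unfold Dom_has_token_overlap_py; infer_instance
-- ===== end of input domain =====

-- B replaces A's per-type symmetric set intersection by one flattened (type, token) index set over src and a single membership pass over dst; return-value equivalence proved for key-nodup inputs (Python dicts).


-- ===== PORT A =====
-- the 'for token_type in src_tokens' loop; dict.get(k, []) is first-match lookup on the association list
def htoLoop (src_tokens dst_tokens : List (String × List String)) : List String → Bool
  | [] => false
  | t :: rest =>
    let src_set := PySem.Set.ofList ((src_tokens.lookup t).getD [])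
    let dst_set := PySem.Set.ofList ((dst_tokens.lookup t).getD [])
    if !(PySem.Set.inter src_set dst_set).isEmpty then true
    else htoLoop src_tokens dst_tokens rest

def has_token_overlap_py (src_tokens : List (String × List String)) (dst_tokens : List (String × List String)) : Bool :=
  htoLoop src_tokens dst_tokens (src_tokens.map Prod.fst)

-- ===== PORT B =====
def has_token_overlap_py_alt (src_tokens : List (String × List String)) (dst_tokens : List (String × List String)) : Bool :=
  let index : PySem.Set (String × String) :=
    PySem.Set.ofList (src_tokens.flatMap (fun p => p.2.map (fun tok => (p.1, tok))))
  dst_tokens.any (fun p => p.2.any (fun tok => PySem.Set.contains index (p.1, tok)))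

-- ===== PRECONDITION & SPEC =====
-- Pre_ excludes association lists with duplicate keys, which a Python dict can never represent (A never receives them).
def Pre_has_token_overlap_py (src_tokens : List (String × List String)) (dst_tokens : List (String × List String)) : Prop :=
  (src_tokens.map Prod.fst).Nodup ∧ (dst_tokens.map Prod.fst).Nodup
instance (src_tokens : List (String × List String)) (dst_tokens : List (String × List String)) : Decidable (Pre_has_token_overlap_py src_tokens dst_tokens) := by unfold Pre_has_token_overlap_py; infer_instance

def pvWitness_has_token_overlap_py : (List (String × List String)) × (List (String × List String)) :=
  ([("cell", ["hek293"]), ("gene", ["tp53"])], [("cell", ["hela"]), ("gene", ["tp53"])])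

def Spec_has_token_overlap_py (src_tokens : List (String × List String)) (dst_tokens : List (String × List String)) (out : Bool) : Prop := out = has_token_overlap_py_alt src_tokens dst_tokens
instance (src_tokens : List (String × List String)) (dst_tokens : List (String × List String)) (out : Bool) : Decidable (Spec_has_token_overlap_py src_tokens dst_tokens out) := by unfold Spec_has_token_overlap_py; infer_instance

-- ===== CLAIM (what is proved, stated in full; the proofs are below) =====
def Claim_equal_has_token_overlap_py : Prop := ∀ (src_tokens : List (String × List String)) (dst_tokens : List (String × List String)), Dom_has_token_overlap_py src_tokens dst_tokens → Pre_has_token_overlap_py src_tokens dst_tokens → Spec_has_token_overlap_py src_tokens dst_tokens (has_token_overlap_py src_tokens dst_tokens)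

-- ===== LEMMAS AND PROOFS =====

-- B is true iff some dst pair shares a (type, token) with some src pair
theorem alt_true_iff (src dst : List (String × List String)) :
    has_token_overlap_py_alt src dst = true ↔
      ∃ p ∈ dst, ∃ tok ∈ p.2, ∃ q ∈ src, q.1 = p.1 ∧ tok ∈ q.2 := by
  simp only [has_token_overlap_py_alt, List.any_eq_true, PySem.Set.contains_iff,
    PySem.Set.mem_ofList, List.mem_flatMap, List.mem_map]
  constructor
  · rintro ⟨p, hp, tok, htok, q, hq, tok', htok', heq⟩
    obtain ⟨h1, h2⟩ := Prod.mk.injEq _ _ _ _ ▸ heq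
    exact ⟨p, hp, tok, htok, q, hq, h1, h2 ▸ htok'⟩
  · rintro ⟨p, hp, tok, htok, q, hq, h1, h2⟩
    exact ⟨p, hp, tok, htok, q, hq, tok, h2, by rw [h1]⟩

-- A's loop is true iff some listed type has a common token under the two lookups
theorem htoLoop_true_iff (src dst : List (String × List String)) (ks : List String) :
    htoLoop src dst ks = true ↔
      ∃ t ∈ ks, ∃ x, x ∈ ((src.lookup t).getD []) ∧ x ∈ ((dst.lookup t).getD []) := by
  induction ks with
  | nil => simp [htoLoop]
  | cons t rest ih =>
    simp only [htoLoop, List.mem_cons]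
    by_cases h : (PySem.Set.inter (PySem.Set.ofList ((src.lookup t).getD []))
        (PySem.Set.ofList ((dst.lookup t).getD []))).isEmpty = true
    · rw [if_neg (by simp [h]), ih]
      have hempty : ∀ x, ¬ (x ∈ ((src.lookup t).getD []) ∧ x ∈ ((dst.lookup t).getD [])) := by
        intro x hx
        have : x ∈ PySem.Set.inter (PySem.Set.ofList ((src.lookup t).getD []))
            (PySem.Set.ofList ((dst.lookup t).getD [])) := by
          rw [PySem.Set.mem_inter]
          simp [PySem.Set.mem_ofList, hx.1, hx.2]
        rw [List.isEmpty_iff] at h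
        simp [h] at this
      constructor
      · rintro ⟨u, hu, hx⟩; exact ⟨u, Or.inr hu, hx⟩
      · rintro ⟨u, hu, x, hx⟩
        rcases hu with rfl | hu
        · exact absurd ⟨hx.1, hx.2⟩ (hempty x)
        · exact ⟨u, hu, x, hx⟩
    · rw [if_pos (by simp [h])]
      rw [Bool.not_eq_true, List.isEmpty_eq_false_iff_exists_mem] at h
      obtain ⟨x, hx⟩ := h
      rw [PySem.Set.mem_inter] at hx
      simp only [PySem.Set.mem_ofList] at hx
      exact iff_of_true rfl ⟨t, Or.inl rfl, x, hx.1, hx.2⟩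

-- first-match lookup on a key-nodup association list is exactly membership of a pair
theorem lookup_getD_mem_iff (l : List (String × List String)) (hnd : (l.map Prod.fst).Nodup)
    (t : String) (x : String) :
    x ∈ ((l.lookup t).getD []) ↔ ∃ p ∈ l, p.1 = t ∧ x ∈ p.2 := by
  induction l with
  | nil => simp
  | cons q rest ih =>
    simp only [List.map_cons, List.nodup_cons] at hnd
    by_cases h : q.1 = t
    · have hlk : List.lookup t (q :: rest) = some q.2 := by
        simp [List.lookup, show (t == q.1) = true by simp [h.symm]]
      rw [hlk]
      simp only [Option.getD_some, List.mem_cons]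
      constructor
      · intro hx; exact ⟨q, Or.inl rfl, h, hx⟩
      · rintro ⟨p, hp, hp1, hpx⟩
        rcases hp with rfl | hp
        · exact hpx
        · exact absurd (show q.1 ∈ rest.map Prod.fst by
            rw [h, ← hp1]; exact List.mem_map.mpr ⟨p, hp, rfl⟩) hnd.1
    · have hlk : List.lookup t (q :: rest) = List.lookup t rest := by
        simp [List.lookup, show (t == q.1) = false by simp [Ne.symm h]]
      rw [hlk, ih hnd.2]
      constructor
      · rintro ⟨p, hp, hx⟩; exact ⟨p, List.mem_cons_of_mem _ hp, hx⟩
      · rintro ⟨p, hp, hp1, hpx⟩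
        rcases List.mem_cons.mp hp with rfl | hp
        · exact absurd hp1 h
        · exact ⟨p, hp, hp1, hpx⟩

-- ===== VERDICT (by name: the statement is the Claim_ definition above) =====
theorem has_token_overlap_py_spec : Claim_equal_has_token_overlap_py := by
  intro src dst _ hpre
  unfold Spec_has_token_overlap_py
  rw [Bool.eq_iff_iff, has_token_overlap_py, htoLoop_true_iff, alt_true_iff]
  constructor
  · rintro ⟨t, _, x, hs, hd⟩
    obtain ⟨q, hq, hq1, hqx⟩ := (lookup_getD_mem_iff src hpre.1 t x).mp hs
    obtain ⟨p, hp, hp1, hpx⟩ := (lookup_getD_mem_iff dst hpre.2 t x).mp hd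
    exact ⟨p, hp, x, hpx, q, hq, by rw [hq1, hp1], hqx⟩
  · rintro ⟨p, hp, tok, htok, q, hq, hq1, hqtok⟩
    refine ⟨p.1, List.mem_map.mpr ⟨q, hq, hq1⟩, tok, ?_, ?_⟩
    · exact (lookup_getD_mem_iff src hpre.1 p.1 tok).mpr ⟨q, hq, hq1, hqtok⟩
    · exact (lookup_getD_mem_iff dst hpre.2 p.1 tok).mpr ⟨p, hp, rfl, htok⟩
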